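-- pv_equiv track=rewrite | github.com/rit-swenms-gang/mupp | src/MatchingAlgorithms.py | checkValidGene
-- ===== SOURCE A (Python) =====
-- def checkValidGene(gene):
--   found = []
--   for schedule in gene.values():
--     for player in schedule:
--       if player in found:
--         return(False)
--       else:
--         found.append(player)
--
--   return(True)
-- ===== SOURCE B (Python) =====
-- def checkValidGene(gene):
--   players = [p for s in gene.values() for p in s]
--   return len(players) == len(set(players))
-- ===== Notes on version B (the rewrite author's own statement) =====
-- stated objective: simpler
-- what changed: Replaced the nested loops with per-element membership scan and early return by a single flatten followed by a length comparison against the deduplicated set.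
import Mathlib
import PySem

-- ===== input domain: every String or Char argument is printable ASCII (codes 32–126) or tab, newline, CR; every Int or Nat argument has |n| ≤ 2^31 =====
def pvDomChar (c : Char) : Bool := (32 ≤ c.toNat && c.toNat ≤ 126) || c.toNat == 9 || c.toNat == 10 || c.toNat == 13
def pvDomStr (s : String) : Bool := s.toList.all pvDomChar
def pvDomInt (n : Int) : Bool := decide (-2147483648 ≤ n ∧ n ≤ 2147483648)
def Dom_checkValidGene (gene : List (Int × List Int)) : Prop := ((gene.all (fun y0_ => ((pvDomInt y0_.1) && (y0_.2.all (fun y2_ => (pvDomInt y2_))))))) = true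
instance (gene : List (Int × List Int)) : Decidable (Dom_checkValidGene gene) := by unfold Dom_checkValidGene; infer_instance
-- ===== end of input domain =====

-- B flattens all schedules once and compares the length with the deduplicated set's length,
-- instead of A's per-player membership scan with early return (objective: simpler).

-- ===== PORT A =====
-- inner 'for player in schedule' loop: none = the early 'return False', some f = updated 'found'
def pvInnerA (found : List Int) : List Int → Option (List Int)
  | [] => some found
  | p :: ps => if found.contains p then none else pvInnerA (found ++ [p]) ps

-- outer 'for schedule in gene.values()' loop
def pvOuterA (found : List Int) : List (List Int) → Bool
  | [] => true
  | s :: ss =>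
    match pvInnerA found s with
    | none => false
    | some f => pvOuterA f ss

def checkValidGene (gene : List (Int × List Int)) : Bool :=
  pvOuterA [] (gene.map Prod.snd)

-- ===== PORT B =====
def checkValidGene_alt (gene : List (Int × List Int)) : Bool :=
  let players := gene.flatMap Prod.snd
  decide (players.length = (PySem.Set.ofList players).length)

-- ===== PRECONDITION & SPEC =====
def Spec_checkValidGene (gene : List (Int × List Int)) (out : Bool) : Prop := out = checkValidGene_alt gene
instance (gene : List (Int × List Int)) (out : Bool) : Decidable (Spec_checkValidGene gene out) := by unfold Spec_checkValidGene; infer_instance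

-- ===== CLAIM (what is proved, stated in full; the proofs are below) =====
def Claim_equal_checkValidGene : Prop := ∀ (gene : List (Int × List Int)), Dom_checkValidGene gene → Spec_checkValidGene gene (checkValidGene gene)

-- ===== LEMMAS AND PROOFS =====
theorem pvInnerA_eq (s found : List Int) (h : found.Nodup) :
    pvInnerA found s = if (found ++ s).Nodup then some (found ++ s) else none := by
  induction s generalizing found with
  | nil => simp [pvInnerA, h]
  | cons p ps ih =>
    by_cases hp : p ∈ found
    · rw [pvInnerA, if_pos (by simpa using hp)]
      have hnot : ¬ (found ++ p :: ps).Nodup := by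
        intro hn
        rw [List.nodup_append] at hn
        exact hn.2.2 p hp p List.mem_cons_self rfl
      simp [hnot]
    · have hnd : (found ++ [p]).Nodup := by
        simp [List.nodup_append, h]
        exact fun a ha hap => hp (hap ▸ ha)
      rw [pvInnerA, if_neg (by simpa using hp), ih _ hnd]
      simp [List.append_assoc]

theorem pvOuterA_eq (ss : List (List Int)) (found : List Int) (h : found.Nodup) :
    pvOuterA found ss = decide (found ++ ss.flatten).Nodup := by
  induction ss generalizing found with
  | nil => simp [pvOuterA, h]
  | cons s ss ih =>
    rw [pvOuterA, pvInnerA_eq s found h]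
    by_cases hnd : (found ++ s).Nodup
    · rw [if_pos hnd]
      show pvOuterA (found ++ s) ss = _
      rw [ih _ hnd]
      simp [List.append_assoc]
    · rw [if_neg hnd]
      show false = _
      have hsub : (found ++ s).Sublist (found ++ (s ++ ss.flatten)) :=
        (List.append_sublist_append_left found).2 (List.sublist_append_left s ss.flatten)
      have hnot : ¬ (found ++ (s ++ ss.flatten)).Nodup := fun hall => hnd (hall.sublist hsub)
      simp only [List.flatten_cons]
      simp [hnot]

theorem ofList_length_eq_iff (xs : List Int) :
    (PySem.Set.ofList xs).length = xs.length ↔ xs.Nodup := by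
  induction xs with
  | nil => simp [PySem.Set.ofList, PySem.Set.empty]
  | cons x xs ih =>
    rw [PySem.Set.ofList_cons]
    constructor
    · intro hlen
      have hfil : (PySem.Set.discard (PySem.Set.ofList xs) x).length
          ≤ (PySem.Set.ofList xs).length := by
        simpa [PySem.Set.discard] using
          List.length_filter_le (fun y => !y == x) (PySem.Set.ofList xs)
      have hle : (PySem.Set.ofList xs).length ≤ xs.length :=
        PySem.Set.length_ofList_le xs
      have hlen' : (PySem.Set.discard (PySem.Set.ofList xs) x).length = xs.length := by
        simpa using hlen
      have heq1 : (PySem.Set.ofList xs).length = xs.length := le_antisymm hle (by omega)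
      have hxs : xs.Nodup := ih.mp heq1
      have hx : x ∉ xs := by
        intro hx
        have hxS : x ∈ PySem.Set.ofList xs := (PySem.Set.mem_ofList xs x).2 hx
        have : (PySem.Set.discard (PySem.Set.ofList xs) x).length
            < (PySem.Set.ofList xs).length := by
          simp only [PySem.Set.discard]
          refine List.length_filter_lt_length_iff_exists.2 ⟨x, hxS, by simp⟩
        omega
      exact List.nodup_cons.2 ⟨hx, hxs⟩
    · intro hnd
      rcases List.nodup_cons.1 hnd with ⟨hx, hxs⟩
      rw [PySem.Set.ofList_eq_self_of_nodup _ hxs]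
      have hdis : PySem.Set.discard xs x = xs := by
        simp only [PySem.Set.discard]
        refine List.filter_eq_self.2 ?_
        intro a ha
        have hne : a ≠ x := fun hax => hx (hax ▸ ha)
        simp [hne]
      rw [hdis]

-- ===== VERDICT (by name: the statement is the Claim_ definition above) =====
theorem checkValidGene_spec : Claim_equal_checkValidGene := by
  intro gene _
  unfold Spec_checkValidGene checkValidGene checkValidGene_alt
  rw [pvOuterA_eq _ _ List.nodup_nil]
  have hflat : (gene.map Prod.snd).flatten = gene.flatMap Prod.snd := by
    simp [List.flatMap_def]
  rw [List.nil_append, hflat]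
  by_cases h : (gene.flatMap Prod.snd).Nodup
  · simp [h, ((ofList_length_eq_iff _).2 h).symm]
  · have hne : ¬ (gene.flatMap Prod.snd).length
        = (PySem.Set.ofList (gene.flatMap Prod.snd)).length :=
      fun he => h ((ofList_length_eq_iff _).1 he.symm)
    simp only [decide_eq_false h, decide_eq_false hne]
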